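-- pv_equiv track=rewrite | github.com/NgoQuocBao1010/Python | Project/pycharm/Algorithm52.py | searchElement
-- ===== SOURCE A (Python) =====
-- def searchElement(a, n):
--     a.sort()
--     rank_list = []
--     rank = 1
--
--     for index in range(len(a)):
--         if index == 0 or a[index] == a[index - 1]:
--             rank_list.append(rank)
--         else:
--             rank += 1
--             rank_list.append(rank)
--
--     for index in range(len(rank_list)):
--         if rank_list[index] == n:
--             return a[index]
--
--     return -1
-- ===== SOURCE B (Python) =====
-- def searchElement(a, n):
--     a.sort()
--     distinct = []
--     for x in a:
--         if not distinct or x != distinct[-1]: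
--             distinct.append(x)
--     if 1 <= n <= len(distinct):
--         return distinct[n - 1]
--     return -1
-- ===== Notes on version B (the rewrite author's own statement) =====
-- stated objective: simpler
-- what changed: Replaces the parallel rank list plus a second index scan with one predecessor-dedupe pass over the sorted list and a direct index: dense rank n is the n-th distinct value, so B returns distinct[n-1] when 1 <= n <= len(distinct), else -1.
import Mathlib
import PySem

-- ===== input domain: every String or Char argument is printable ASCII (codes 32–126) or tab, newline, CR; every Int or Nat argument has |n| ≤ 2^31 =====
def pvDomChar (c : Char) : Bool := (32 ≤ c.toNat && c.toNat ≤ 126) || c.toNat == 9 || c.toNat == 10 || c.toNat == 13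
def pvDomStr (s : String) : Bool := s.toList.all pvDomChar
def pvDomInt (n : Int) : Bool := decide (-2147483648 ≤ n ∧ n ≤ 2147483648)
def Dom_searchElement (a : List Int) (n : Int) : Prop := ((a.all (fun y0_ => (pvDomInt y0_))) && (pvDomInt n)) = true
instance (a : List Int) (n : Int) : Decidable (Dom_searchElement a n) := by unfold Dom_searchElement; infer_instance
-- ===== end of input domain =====

-- B replaces A's rank list + second matching scan by one predecessor-dedupe pass and a direct
-- index (simpler decomposition). Both sort in place; equivalence proved is about the RETURN value.

-- ===== PORT A =====
-- first loop: for index in range(len(a)): build rank_list (indices are in range, so getD is exact)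
def pvRanksLoop (s : List Int) (i : Nat) (rank : Int) (acc : List Int) : List Int :=
  if i < s.length then
    if i == 0 || s.getD i 0 == s.getD (i - 1) 0 then
      pvRanksLoop s (i + 1) rank (acc ++ [rank])
    else
      pvRanksLoop s (i + 1) (rank + 1) (acc ++ [rank + 1])
  else acc
termination_by s.length - i

-- second loop: first index with rank_list[index] == n returns a[index], else fall through to -1
def pvFindLoop (rl s : List Int) (n : Int) (i : Nat) : Int :=
  if i < rl.length then
    if rl.getD i 0 == n then s.getD i 0 else pvFindLoop rl s n (i + 1)
  else -1
termination_by rl.length - i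

def searchElement (a : List Int) (n : Int) : Int :=
  let s := PySem.List.sorted a (fun x => x) false   -- a.sort()
  pvFindLoop (pvRanksLoop s 0 1 []) s n 0

-- ===== PORT B =====
-- for x in a: if not distinct or x != distinct[-1]: distinct.append(x)
def pvDedupLoop (acc : List Int) : List Int → List Int
  | [] => acc
  | x :: t =>
    if acc.isEmpty || acc.getLast? != some x then pvDedupLoop (acc ++ [x]) t
    else pvDedupLoop acc t

def searchElement_alt (a : List Int) (n : Int) : Int :=
  let s := PySem.List.sorted a (fun x => x) false   -- a.sort()
  let d := pvDedupLoop [] s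
  -- distinct[n - 1]: the guard makes the index in range, so the default is never used
  if 1 ≤ n ∧ n ≤ (d.length : Int) then PySem.List.pyGetD d (n - 1) (-1) else -1

-- ===== PRECONDITION & SPEC =====
def Spec_searchElement (a : List Int) (n : Int) (out : Int) : Prop := out = searchElement_alt a n
instance (a : List Int) (n : Int) (out : Int) : Decidable (Spec_searchElement a n out) := by unfold Spec_searchElement; infer_instance

-- ===== CLAIM (what is proved, stated in full; the proofs are below) =====
def Claim_equal_searchElement : Prop := ∀ (a : List Int) (n : Int), Dom_searchElement a n → Spec_searchElement a n (searchElement a n)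

-- ===== LEMMAS AND PROOFS =====

-- structural versions of the loops, parametrised by the previous element
def pvRanksFrom : List Int → Option Int → Int → List Int
  | [], _, _ => []
  | x :: t, none, r => r :: pvRanksFrom t (some x) r
  | x :: t, some p, r =>
    if x = p then r :: pvRanksFrom t (some x) r else (r + 1) :: pvRanksFrom t (some x) (r + 1)

def pvFindFrom : List Int → List Int → Int → Int
  | r :: rt, x :: xt, n => if r = n then x else pvFindFrom rt xt n
  | _, _, _ => -1

def pvDedupFrom : List Int → Option Int → List Int
  | [], _ => []
  | x :: t, p => if p = some x then pvDedupFrom t (some x) else x :: pvDedupFrom t (some x)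

theorem pvLen_ranksFrom (s : List Int) : ∀ p r, (pvRanksFrom s p r).length = s.length := by
  induction s with
  | nil => intro p r; cases p <;> rfl
  | cons x t ih =>
    intro p r
    cases p with
    | none => simp [pvRanksFrom, ih]
    | some q => by_cases h : x = q <;> simp [pvRanksFrom, h, ih]

theorem pvGetD_nil (i : Int) (d : Int) : PySem.List.pyGetD ([] : List Int) i d = d := by
  simp [PySem.List.pyGetD, PySem.List.pyGet?, PySem.List.pyIdx?]

theorem pvGetD_cons_pos (x : Int) (xs : List Int) (i : Int) (d : Int) (h : 1 ≤ i) :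
    PySem.List.pyGetD (x :: xs) i d = PySem.List.pyGetD xs (i - 1) d := by
  have h0 : (0 : Int) ≤ i := by omega
  have h1 : (0 : Int) ≤ i - 1 := by omega
  rw [PySem.List.pyGetD, PySem.List.pyGetD,
    PySem.List.pyGet?_of_nonneg _ h0, PySem.List.pyGet?_of_nonneg _ h1]
  have : i.toNat = (i - 1).toNat + 1 := by omega
  rw [this]
  simp

theorem pvGetD_oob (xs : List Int) (i : Int) (d : Int) (h0 : 0 ≤ i) (h : (xs.length : Int) ≤ i) :
    PySem.List.pyGetD xs i d = d := by
  rw [PySem.List.pyGetD, PySem.List.pyGet?_of_nonneg _ h0]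
  have : xs.length ≤ i.toNat := by omega
  simp [List.getElem?_eq_none this]

-- core: first index with dense rank n, expressed through the dedupe list
theorem pvCore_some (s : List Int) : ∀ (p r n : Int),
    pvFindFrom (pvRanksFrom s (some p) r) s n =
      if n = r ∧ s.head? = some p then p
      else if r + 1 ≤ n then PySem.List.pyGetD (pvDedupFrom s (some p)) (n - r - 1) (-1)
      else -1 := by
  induction s with
  | nil =>
    intro p r n
    have e0 : pvFindFrom (pvRanksFrom [] (some p) r) [] n = -1 := rfl
    rw [e0, pvDedupFrom]
    split_ifs with h1 h2
    · simp at h1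
    · rw [pvGetD_nil]
    · rfl
  | cons x t ih =>
    intro p r n
    have hhead : (x :: t).head? = some x := rfl
    by_cases hx : x = p
    · subst hx
      have e1 : pvRanksFrom (x :: t) (some x) r = r :: pvRanksFrom t (some x) r := by
        rw [pvRanksFrom, if_pos rfl]
      have e2 : pvDedupFrom (x :: t) (some x) = pvDedupFrom t (some x) := by
        rw [pvDedupFrom, if_pos rfl]
      rw [e1, e2, pvFindFrom, hhead]
      by_cases hn : n = r
      · rw [if_pos hn.symm, if_pos ⟨hn, rfl⟩]
      · rw [if_neg (fun h => hn h.symm), if_neg (fun h => hn h.1), ih]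
        rw [if_neg (fun (h : n = r ∧ t.head? = some x) => hn h.1)]
    · have hxp : (some p : Option Int) ≠ some x := fun h => hx (Option.some.inj h).symm
      have e1 : pvRanksFrom (x :: t) (some p) r = (r + 1) :: pvRanksFrom t (some x) (r + 1) := by
        rw [pvRanksFrom, if_neg hx]
      have e2 : pvDedupFrom (x :: t) (some p) = x :: pvDedupFrom t (some x) := by
        rw [pvDedupFrom, if_neg hxp]
      rw [e1, e2, pvFindFrom, hhead]
      have hfirst : ¬ (n = r ∧ (some x : Option Int) = some p) :=
        fun h => hx (Option.some.inj h.2)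
      rw [if_neg hfirst]
      by_cases hn : r + 1 = n
      · rw [if_pos hn, if_pos (by omega)]
        rw [show n - r - 1 = (0 : Int) by omega, PySem.List.pyGetD_zero_cons]
      · rw [if_neg hn, ih]
        rw [if_neg (fun (h : n = r + 1 ∧ t.head? = some x) => hn h.1.symm)]
        by_cases h2 : r + 1 + 1 ≤ n
        · rw [if_pos h2, if_pos (by omega), pvGetD_cons_pos _ _ _ _ (by omega)]
          congr 1; omega
        · rw [if_neg h2, if_neg (by omega)]

theorem pvCore_none (s : List Int) (r n : Int) :
    pvFindFrom (pvRanksFrom s none r) s n =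
      if r ≤ n then PySem.List.pyGetD (pvDedupFrom s none) (n - r) (-1) else -1 := by
  cases s with
  | nil =>
    have e0 : pvFindFrom (pvRanksFrom [] none r) [] n = -1 := rfl
    rw [e0, pvDedupFrom]
    split_ifs
    · rw [pvGetD_nil]
    · rfl
  | cons x t =>
    have e1 : pvRanksFrom (x :: t) none r = r :: pvRanksFrom t (some x) r := rfl
    have e2 : pvDedupFrom (x :: t) none = x :: pvDedupFrom t (some x) := rfl
    rw [e1, e2, pvFindFrom]
    by_cases hn : r = n
    · rw [if_pos hn, if_pos (le_of_eq hn)]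
      rw [show n - r = (0 : Int) by omega, PySem.List.pyGetD_zero_cons]
    · rw [if_neg hn, pvCore_some]
      rw [if_neg (fun (h : n = r ∧ t.head? = some x) => hn h.1.symm)]
      by_cases h2 : r + 1 ≤ n
      · rw [if_pos h2, if_pos (by omega), pvGetD_cons_pos _ _ _ _ (by omega)]
      · rw [if_neg h2, if_neg (by omega)]

-- bridge: the index loop building rank_list equals the structural version
theorem pvRanks_bridge (s : List Int) : ∀ (i : Nat) (r : Int) (acc : List Int),
    pvRanksLoop s i r acc =
      acc ++ pvRanksFrom (s.drop i) (if i = 0 then none else s[i - 1]?) r := by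
  intro i
  induction hfi : s.length - i using Nat.strong_induction_on generalizing i with
  | _ fuel ih =>
  intro r acc
  rw [pvRanksLoop]
  by_cases hi : i < s.length
  · have hdrop : s.drop i = s[i] :: s.drop (i + 1) := List.drop_eq_getElem_cons hi
    rw [if_pos hi]
    by_cases h0 : i = 0
    · subst h0
      have hc : ((0 : Nat) == 0 || s.getD 0 0 == s.getD (0 - 1) 0) = true := by simp
      rw [if_pos hc, ih (s.length - 1) (by omega) 1 (by omega) r (acc ++ [r])]
      have hprev' : (if (0 : Nat) + 1 = 0 then (none : Option Int) else s[0 + 1 - 1]?) = some s[0] := by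
        simp [List.getElem?_eq_getElem hi]
      rw [hprev', hdrop]
      have e1 : pvRanksFrom (s[0] :: s.drop (0 + 1)) none r
          = r :: pvRanksFrom (s.drop (0 + 1)) (some s[0]) r := rfl
      rw [if_pos rfl, e1]
      simp [List.append_assoc]
    · have hi1 : i - 1 < s.length := by omega
      have hprev : (if i = 0 then none else s[i - 1]?) = some s[i - 1] := by
        rw [if_neg h0]; exact List.getElem?_eq_getElem hi1
      have hprev' : (if i + 1 = 0 then (none : Option Int) else s[i + 1 - 1]?) = some s[i] := by
        rw [if_neg (Nat.succ_ne_zero i)]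
        simp [List.getElem?_eq_getElem hi]
      have hgd : s.getD i 0 = s[i] := List.getD_eq_getElem s 0 hi
      have hgd1 : s.getD (i - 1) 0 = s[i - 1] := List.getD_eq_getElem s 0 hi1
      by_cases heq : s[i] = s[i - 1]
      · have hc : (i == 0 || s.getD i 0 == s.getD (i - 1) 0) = true := by
          simp [List.getD, List.getElem?_eq_getElem hi, List.getElem?_eq_getElem hi1, heq]
        rw [if_pos hc, ih (s.length - (i + 1)) (by omega) (i + 1) (by omega) r (acc ++ [r])]
        rw [hprev', hdrop, hprev]
        have e1 : pvRanksFrom (s[i] :: s.drop (i + 1)) (some s[i - 1]) r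
            = r :: pvRanksFrom (s.drop (i + 1)) (some s[i]) r := by
          rw [pvRanksFrom, if_pos heq]
        rw [e1]
        simp [List.append_assoc]
      · have hc : ¬ ((i == 0 || s.getD i 0 == s.getD (i - 1) 0) = true) := by
          simp [h0, List.getD, List.getElem?_eq_getElem hi, List.getElem?_eq_getElem hi1, heq]
        rw [if_neg hc, ih (s.length - (i + 1)) (by omega) (i + 1) (by omega) (r + 1) (acc ++ [r + 1])]
        rw [hprev', hdrop, hprev]
        have e1 : pvRanksFrom (s[i] :: s.drop (i + 1)) (some s[i - 1]) r
            = (r + 1) :: pvRanksFrom (s.drop (i + 1)) (some s[i]) (r + 1) := by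
          rw [pvRanksFrom, if_neg heq]
        rw [e1]
        simp [List.append_assoc]
  · rw [if_neg hi]
    rw [List.drop_eq_nil_of_le (by omega)]
    cases h : (if i = 0 then (none : Option Int) else s[i - 1]?) <;> simp [pvRanksFrom]

-- bridge: the search loop equals the structural version
theorem pvFind_bridge (rl s : List Int) (n : Int) (hlen : rl.length = s.length) :
    ∀ i : Nat, pvFindLoop rl s n i = pvFindFrom (rl.drop i) (s.drop i) n := by
  intro i
  induction hfi : rl.length - i using Nat.strong_induction_on generalizing i with
  | _ fuel ih =>
  rw [pvFindLoop]
  by_cases hi : i < rl.length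
  · have his : i < s.length := by omega
    rw [if_pos hi, List.drop_eq_getElem_cons hi, List.drop_eq_getElem_cons his, pvFindFrom]
    rw [List.getD_eq_getElem rl 0 hi, List.getD_eq_getElem s 0 his]
    by_cases h : rl[i] = n
    · simp [h]
    · simp only [beq_iff_eq, h, if_false]
      exact ih (rl.length - (i + 1)) (by omega) (i + 1) (by omega)
  · rw [if_neg hi, List.drop_eq_nil_of_le (by omega)]
    cases s.drop i <;> rfl

-- bridge: B's loop equals the structural dedupe
theorem pvDedup_bridge : ∀ (t acc : List Int),
    pvDedupLoop acc t = acc ++ pvDedupFrom t acc.getLast? := by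
  intro t
  induction t with
  | nil => intro acc; simp [pvDedupLoop, pvDedupFrom]
  | cons x t ih =>
    intro acc
    rw [pvDedupLoop]
    by_cases hl : acc.getLast? = some x
    · have hne : acc ≠ [] := by intro h; simp [h] at hl
      have hc : ¬ ((acc.isEmpty || acc.getLast? != some x) = true) := by
        simp [hl, List.isEmpty_eq_false_iff.mpr hne]
      rw [if_neg hc, ih, pvDedupFrom, hl, if_pos rfl]
    · have hc : (acc.isEmpty || acc.getLast? != some x) = true := by
        simp [hl]
      rw [if_pos hc, ih, pvDedupFrom]
      have : (acc ++ [x]).getLast? = some x := by simp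
      rw [this, if_neg hl]
      simp

-- ===== VERDICT (by name: the statement is the Claim_ definition above) =====
theorem searchElement_spec : Claim_equal_searchElement := by
  intro a n _
  unfold Spec_searchElement
  simp only [searchElement, searchElement_alt]
  generalize PySem.List.sorted a (fun x => x) false = s
  have hranks : pvRanksLoop s 0 1 [] = pvRanksFrom s none 1 := by
    rw [pvRanks_bridge s 0 1 []]; simp
  have hlen : (pvRanksFrom s none 1).length = s.length := pvLen_ranksFrom s none 1
  have hded : pvDedupLoop [] s = pvDedupFrom s none := by
    rw [pvDedup_bridge s []]; rfl
  rw [hranks, hded, pvFind_bridge _ _ n hlen 0]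
  simp only [List.drop_zero]
  rw [pvCore_none]
  by_cases h1 : (1 : Int) ≤ n
  · rw [if_pos h1]
    by_cases h2 : n ≤ ((pvDedupFrom s none).length : Int)
    · rw [if_pos ⟨h1, h2⟩]
    · rw [if_neg (by intro h; exact h2 h.2)]
      exact pvGetD_oob _ _ _ (by omega) (by omega)
  · rw [if_neg h1, if_neg (by intro h; exact h1 h.1)]
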